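-- pv_equiv track=rewrite | github.com/pranavchandra-dotcom/Food-Recipes | assignment_2.py | find_significant_energy_increase_brute
-- ===== SOURCE A (Python) =====
-- def find_significant_energy_increase_brute(A):
--     mostSignificant=0
--     start,end=0,0
--     for i in range(len(A)-1):
--         currentMax=0
--         reachedMaxAt=i
--         for j in range(i+1,len(A)):
--             if A[j]-A[i]>currentMax:
--                 currentMax=A[j]-A[i]
--                 reachedMaxAt=j
--                 if currentMax>mostSignificant:
--                     mostSignificant=currentMax
--                     start=i
--                     end=reachedMaxAt
--                     return(start,end)
-- ===== SOURCE B (Python) =====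
-- def find_significant_energy_increase_brute(A):
--     n = len(A)
--     if n < 2:
--         return None
--     # suffix maxima: M[k] = max(A[k:])
--     M = [0] * n
--     M[n - 1] = A[n - 1]
--     for k in range(n - 2, -1, -1):
--         M[k] = A[k] if A[k] > M[k + 1] else M[k + 1]
--     for i in range(n - 1):
--         if M[i + 1] > A[i]:
--             j = i + 1
--             while A[j] <= A[i]:
--                 j += 1
--             return (i, j)
--     return None
-- ===== Notes on version B (the rewrite author's own statement) =====
-- stated objective: faster
-- what changed: Replaces the nested quadratic scan by a precomputed suffix-maximum array: the first i with suffixmax(A[i+1:]) > A[i] is found in one linear pass, then a single forward scan finds the first j with A[j] > A[i].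
import Mathlib
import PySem

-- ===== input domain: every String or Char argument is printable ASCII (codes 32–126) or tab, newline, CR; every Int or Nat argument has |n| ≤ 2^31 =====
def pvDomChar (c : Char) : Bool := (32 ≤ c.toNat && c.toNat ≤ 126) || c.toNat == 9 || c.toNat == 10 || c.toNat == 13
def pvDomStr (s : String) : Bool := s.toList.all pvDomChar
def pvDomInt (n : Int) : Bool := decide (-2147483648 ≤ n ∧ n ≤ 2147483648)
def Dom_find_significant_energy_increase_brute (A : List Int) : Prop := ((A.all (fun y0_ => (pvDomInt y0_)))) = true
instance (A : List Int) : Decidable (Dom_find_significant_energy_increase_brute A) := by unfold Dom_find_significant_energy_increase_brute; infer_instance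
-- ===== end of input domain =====

-- B replaces A's nested quadratic scan by a suffix-maximum array plus two linear scans (alternative algorithm, same return value).

-- ===== PORT A =====
-- inner 'for j in range(i+1,len(A))' loop of A, with its mutable state
-- (currentMax, reachedMaxAt, mostSignificant) carried as arguments
def pvInnerA (A : List Int) (i : Nat) (ai : Int) :
    List Nat → Int → Nat → Int → Option (Int × Int)
  | [], _, _, _ => none
  | j :: rest, currentMax, reachedMaxAt, mostSignificant =>
    let aj := A.getD j 0
    if aj - ai > currentMax then
      if aj - ai > mostSignificant then some ((i : Int), (j : Int))
      else pvInnerA A i ai rest (aj - ai) j mostSignificant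
    else pvInnerA A i ai rest currentMax reachedMaxAt mostSignificant

-- outer 'for i in range(len(A)-1)' loop of A (mostSignificant threaded through)
def pvOuterA (A : List Int) : List Nat → Int → Option (Int × Int)
  | [], _ => none
  | i :: rest, ms =>
    match pvInnerA A i (A.getD i 0) (List.range' (i + 1) (A.length - 1 - i)) 0 i ms with
    | some p => some p
    | none => pvOuterA A rest ms

def find_significant_energy_increase_brute (A : List Int) : Option (Int × Int) :=
  pvOuterA A (List.range (A.length - 1)) 0

-- ===== PORT B =====
-- suffix-maximum array M with M[k] = max(A[k:]), built right-to-left as Source B does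
def pvSuffixMax : List Int → List Int
  | [] => []
  | [x] => [x]
  | x :: y :: t =>
    let m := pvSuffixMax (y :: t)
    (if x > m.headD 0 then x else m.headD 0) :: m

-- the 'while A[j] <= A[i]: j += 1' scan, walking the suffix starting at index j
def pvFindJ : List Int → Int → Nat → Nat
  | [], _, j => j
  | x :: rest, ai, j => if x ≤ ai then pvFindJ rest ai (j + 1) else j

-- the 'for i in range(n-1)' scan of Source B, walking A and M in step
def pvAltLoop : List Int → List Int → Nat → Option (Int × Int)
  | a :: arest, _ :: m2 :: mrest, i =>
    if m2 > a then some ((i : Int), (pvFindJ arest a (i + 1) : Int))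
    else pvAltLoop arest (m2 :: mrest) (i + 1)
  | _, _, _ => none

def find_significant_energy_increase_brute_alt (A : List Int) : Option (Int × Int) :=
  if A.length < 2 then none
  else pvAltLoop A (pvSuffixMax A) 0

-- ===== PRECONDITION & SPEC =====
def Spec_find_significant_energy_increase_brute (A : List Int) (out : Option (Int × Int)) : Prop := out = find_significant_energy_increase_brute_alt A
instance (A : List Int) (out : Option (Int × Int)) : Decidable (Spec_find_significant_energy_increase_brute A out) := by unfold Spec_find_significant_energy_increase_brute; infer_instance

-- ===== CLAIM (what is proved, stated in full; the proofs are below) =====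
def Claim_equal_find_significant_energy_increase_brute : Prop := ∀ (A : List Int), Dom_find_significant_energy_increase_brute A → Spec_find_significant_energy_increase_brute A (find_significant_energy_increase_brute A)

-- ===== LEMMAS AND PROOFS =====

-- common reference: first i with a strictly larger later element, then first such j
def pvSpec : List Int → Nat → Option (Int × Int)
  | [], _ => none
  | a :: rest, i =>
    if rest.any (fun z => a < z) then some ((i : Int), (pvFindJ rest a (i + 1) : Int))
    else pvSpec rest (i + 1)

lemma pvSuffixMax_cons (y : Int) (t : List Int) :
    pvSuffixMax (y :: t) = (pvSuffixMax (y :: t)).headD 0 :: (pvSuffixMax (y :: t)).tail := by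
  cases t <;> simp [pvSuffixMax]

lemma pvSuffixMax_head_gt (a : Int) : ∀ (t : List Int) (x : Int),
    (a < (pvSuffixMax (x :: t)).headD 0) ↔ (x :: t).any (fun z => a < z) = true := by
  intro t
  induction t with
  | nil => intro x; simp [pvSuffixMax]
  | cons y t ih =>
    intro x
    rw [show pvSuffixMax (x :: y :: t) =
        (if x > (pvSuffixMax (y :: t)).headD 0 then x
         else (pvSuffixMax (y :: t)).headD 0) :: pvSuffixMax (y :: t) from rfl]
    rw [List.headD_cons, List.any_cons, Bool.or_eq_true, decide_eq_true_iff, ← ih y]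
    generalize (pvSuffixMax (y :: t)).headD 0 = h
    split_ifs with hx <;> omega

lemma pvAltLoop_eq_spec : ∀ (xs : List Int) (i : Nat),
    pvAltLoop xs (pvSuffixMax xs) i = pvSpec xs i := by
  intro xs
  induction xs with
  | nil => intro i; simp [pvAltLoop, pvSpec]
  | cons a rest ih =>
    intro i
    cases rest with
    | nil => simp [pvAltLoop, pvSuffixMax, pvSpec]
    | cons y t =>
      have hshape := pvSuffixMax_cons y t
      simp only [pvSuffixMax]
      rw [hshape]
      simp only [pvAltLoop, pvSpec]
      by_cases hc : a < (pvSuffixMax (y :: t)).headD 0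
      · rw [if_pos hc, if_pos ((pvSuffixMax_head_gt a t y).mp hc)]
      · rw [if_neg hc, if_neg (fun h => hc ((pvSuffixMax_head_gt a t y).mpr h))]
        rw [← hshape, ih]
        simp only [pvSpec]

lemma pvInnerA_eq (A : List Int) (i : Nat) (ai : Int) :
    ∀ (k b : Nat) (r : Nat), b + k = A.length →
    pvInnerA A i ai (List.range' b k) 0 r 0 =
      (if (A.drop b).any (fun z => ai < z) then
        some ((i : Int), (pvFindJ (A.drop b) ai b : Int)) else none) := by
  intro k
  induction k with
  | zero =>
    intro b r hb
    have : A.drop b = [] := List.drop_eq_nil_of_le (by omega)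
    simp [pvInnerA, this]
  | succ k ih =>
    intro b r hb
    have hlt : b < A.length := by omega
    have hdrop : A.drop b = A[b] :: A.drop (b + 1) := List.drop_eq_getElem_cons hlt
    have hget : A.getD b 0 = A[b] := List.getD_eq_getElem A 0 hlt
    rw [List.range'_succ]
    simp only [pvInnerA, hget, hdrop, List.any_cons, pvFindJ]
    by_cases hc : ai < A[b]
    · simp [show ¬(A[b] ≤ ai) from by omega, hc]
    · rw [if_neg (show ¬(A[b] - ai > 0) by omega), ih (b + 1) r (by omega)]
      simp [hc, show A[b] ≤ ai from by omega]

lemma pvSpec_none_of_short : ∀ (xs : List Int), xs.length ≤ 1 → ∀ i, pvSpec xs i = none := by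
  intro xs
  cases xs with
  | nil => intro _ i; simp [pvSpec]
  | cons a rest =>
    intro h i
    have : rest = [] := by
      cases rest with
      | nil => rfl
      | cons _ _ => simp at h
    subst this
    simp [pvSpec]

lemma pvOuterA_eq (A : List Int) :
    ∀ (k b : Nat), b + k = A.length - 1 →
    pvOuterA A (List.range' b k) 0 = pvSpec (A.drop b) b := by
  intro k
  induction k with
  | zero =>
    intro b hb
    rw [pvSpec_none_of_short (A.drop b) (by simp; omega) b]
    simp [pvOuterA]
  | succ k ih =>
    intro b hb
    have hlt : b < A.length := by omega
    have hdrop : A.drop b = A[b] :: A.drop (b + 1) := List.drop_eq_getElem_cons hlt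
    have hget : A.getD b 0 = A[b] := List.getD_eq_getElem A 0 hlt
    rw [List.range'_succ]
    simp only [pvOuterA, hget]
    rw [pvInnerA_eq A b (A[b]) (A.length - 1 - b) (b + 1) b (by omega)]
    rw [hdrop]
    simp only [pvSpec]
    by_cases hc : ((A.drop (b + 1)).any fun z => A[b] < z) = true
    · rw [if_pos hc, if_pos hc]
    · rw [if_neg hc, if_neg hc]
      exact ih (b + 1) (by omega)

lemma portA_eq_spec (A : List Int) : find_significant_energy_increase_brute A = pvSpec A 0 := by
  unfold find_significant_energy_increase_brute
  rw [List.range_eq_range', pvOuterA_eq A (A.length - 1) 0 (by omega)]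
  simp

lemma portB_eq_spec (A : List Int) : find_significant_energy_increase_brute_alt A = pvSpec A 0 := by
  unfold find_significant_energy_increase_brute_alt
  by_cases h : A.length < 2
  · rw [if_pos h, pvSpec_none_of_short A (by omega) 0]
  · rw [if_neg h, pvAltLoop_eq_spec]

-- ===== VERDICT (by name: the statement is the Claim_ definition above) =====
theorem find_significant_energy_increase_brute_spec : Claim_equal_find_significant_energy_increase_brute := by
  intro A _
  unfold Spec_find_significant_energy_increase_brute
  rw [portA_eq_spec, portB_eq_spec]
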